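-- pv_equiv track=rewrite | github.com/DomBozianu/SpotBot | engine.py | get_wind_color
-- ===== SOURCE A (Python) =====
-- def get_wind_color(knots):
--     """Maps wind speed to a UI color badge name."""
--     color_thresholds = [
--         (13, "light"),
--         (19, "green"),
--         (26, "sweet"),
--         (36, "heavy"),
--         (float('inf'), "nuke")
--     ]
--     return next(color for limit, color in color_thresholds if knots < limit)
-- ===== SOURCE B (Python) =====
-- def get_wind_color(knots):
--     """Maps wind speed to a UI color badge name."""
--     breakpoints = [13, 19, 26, 36]
--     colors = ["light", "green", "sweet", "heavy", "nuke"]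
--     lo, hi = 0, len(breakpoints)
--     while lo < hi:  # bisect_right: first index with knots < breakpoints[index]
--         mid = (lo + hi) // 2
--         if knots < breakpoints[mid]:
--             hi = mid
--         else:
--             lo = mid + 1
--     return colors[lo]
-- ===== Notes on version B (the rewrite author's own statement) =====
-- stated objective: alternative
-- what changed: Replaces the linear first-match scan over (limit, color) pairs by a binary search (bisect_right) over a sorted breakpoint list indexing into a parallel color table.
import Mathlib
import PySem

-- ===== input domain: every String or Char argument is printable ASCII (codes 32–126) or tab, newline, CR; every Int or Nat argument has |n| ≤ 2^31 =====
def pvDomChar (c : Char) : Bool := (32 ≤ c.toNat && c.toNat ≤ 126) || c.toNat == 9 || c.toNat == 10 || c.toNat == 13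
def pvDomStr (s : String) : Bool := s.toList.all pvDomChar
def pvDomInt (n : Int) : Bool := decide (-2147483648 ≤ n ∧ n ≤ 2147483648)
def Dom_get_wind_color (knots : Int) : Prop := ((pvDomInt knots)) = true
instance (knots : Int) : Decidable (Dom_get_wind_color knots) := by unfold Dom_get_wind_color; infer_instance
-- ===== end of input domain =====

-- B replaces A's linear first-match scan with a binary search over sorted breakpoints plus a parallel color table (alternative decomposition, same result).


-- ===== PORT A =====
-- first (limit, color) with knots < limit; the last limit is float('inf'), which every Int is below, so the final arm always matches
def get_wind_color (knots : Int) : String :=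
  if knots < 13 then "light"
  else if knots < 19 then "green"
  else if knots < 26 then "sweet"
  else if knots < 36 then "heavy"
  else "nuke"

-- ===== PORT B =====
-- the while-loop of Source B: bisect_right on the breakpoint list; hi - lo strictly decreases
def pvBisectLoop (bps : List Int) (knots : Int) (lo hi : Nat) : Nat :=
  if lo < hi then
    let mid := (lo + hi) / 2
    if knots < bps.getD mid 0 then
      pvBisectLoop bps knots lo mid
    else
      pvBisectLoop bps knots (mid + 1) hi
  else lo
termination_by hi - lo
decreasing_by all_goals omega

def get_wind_color_alt (knots : Int) : String :=
  let bps : List Int := [13, 19, 26, 36]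
  let colors : List String := ["light", "green", "sweet", "heavy", "nuke"]
  -- indices stay in range (lo ≤ 4, mid < 4), so getD is exact for Python's indexing here
  colors.getD (pvBisectLoop bps knots 0 bps.length) ""

-- ===== PRECONDITION & SPEC =====
def Spec_get_wind_color (knots : Int) (out : String) : Prop := out = get_wind_color_alt knots
instance (knots : Int) (out : String) : Decidable (Spec_get_wind_color knots out) := by unfold Spec_get_wind_color; infer_instance

-- ===== CLAIM (what is proved, stated in full; the proofs are below) =====
def Claim_equal_get_wind_color : Prop := ∀ (knots : Int), Dom_get_wind_color knots → Spec_get_wind_color knots (get_wind_color knots)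

-- ===== LEMMAS AND PROOFS =====

-- ===== VERDICT (by name: the statement is the Claim_ definition above) =====
theorem get_wind_color_spec : Claim_equal_get_wind_color := by
  intro knots _
  unfold Spec_get_wind_color get_wind_color get_wind_color_alt
  by_cases h13 : knots < 13
  · have h26 : knots < 26 := by omega
    have h19 : knots < 19 := by omega
    simp only [List.length_cons, List.length_nil]
    rw [pvBisectLoop]; simp only [List.getD]
    norm_num [h26]
    rw [pvBisectLoop]; norm_num [h19]
    rw [pvBisectLoop]; norm_num [h13]
    rw [pvBisectLoop]; norm_num [h13]
  · by_cases h19 : knots < 19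
    · have h26 : knots < 26 := by omega
      simp only [List.length_cons, List.length_nil]
      rw [pvBisectLoop]; norm_num [h26]
      rw [pvBisectLoop]; norm_num [h19]
      rw [pvBisectLoop]; norm_num [h13]
      rw [pvBisectLoop]; norm_num [h13, h19]
    · by_cases h26 : knots < 26
      · simp only [List.length_cons, List.length_nil]
        rw [pvBisectLoop]; norm_num [h26]
        rw [pvBisectLoop]; norm_num [h19]
        rw [pvBisectLoop]; norm_num [h13, h19, h26]
      · by_cases h36 : knots < 36
        · simp only [List.length_cons, List.length_nil]
          rw [pvBisectLoop]; norm_num [h26]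
          rw [pvBisectLoop]; norm_num [h36]
          rw [pvBisectLoop]; norm_num [h13, h19, h26, h36]
        · simp only [List.length_cons, List.length_nil]
          rw [pvBisectLoop]; norm_num [h26]
          rw [pvBisectLoop]; norm_num [h36]
          rw [pvBisectLoop]; norm_num [h13, h19, h26, h36]
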